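-- pv_equiv track=rewrite | github.com/ssung099/CTF-Writeups | lactf-2026/lazy-bigrams/solver.py | decode_phonetic_concatenated
-- ===== SOURCE A (Python) =====
-- phonetic_map = {"A":"ALPHA","B":"BRAVO","C":"CHARLIE","D":"DELTA","E":"ECHO","F":"FOXTROT","G":"GOLF","H":"HOTEL","I":"INDIA","J":"JULIETT","K":"KILO","L":"LIMA","M":"MIKE","N":"NOVEMBER","O":"OSCAR","P":"PAPA","Q":"QUEBEC","R":"ROMEO","S":"SIERRA","T":"TANGO","U":"UNIFORM","V":"VICTOR","W":"WHISKEY","X":"XRAY","Y":"YANKEE","Z":"ZULU","_":"UNDERSCORE","{":"OPENCURLYBRACE","}":"CLOSECURLYBRACE","0":"ZERO","1":"ONE","2":"TWO","3":"THREE","4":"FOUR","5":"FIVE","6":"SIX","7":"SEVEN","8":"EIGHT","9":"NINE"}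
--
-- def decode_phonetic_concatenated(s):
--     """
--     Decode a concatenated phonetic string into letters using phonetic_map.
--
--     Args:
--         s (str): concatenated phonetic words (no spaces)
--         phonetic_map (dict): char -> phonetic word
--
--     Returns:
--         str: decoded letters
--     """
--     # Reverse map: word -> char
--     reverse_map = {v: k for k, v in phonetic_map.items()}
--     # Sort phonetic words by length descending (greedy match)
--     words = sorted(reverse_map.keys(), key=len, reverse=True)
--
--     result = ""
--     i = 0
--     while i < len(s):
--         matched = False
--         for w in words:
--             if s.startswith(w, i):
--                 result += reverse_map[w]
--                 i += len(w)
--                 matched = True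
--                 break
--         if not matched:
--             # unknown part, put a placeholder or skip
--             result += "?"
--             i += 1
--     return result
-- ===== SOURCE B (Python) =====
-- phonetic_map = {"A":"ALPHA","B":"BRAVO","C":"CHARLIE","D":"DELTA","E":"ECHO","F":"FOXTROT","G":"GOLF","H":"HOTEL","I":"INDIA","J":"JULIETT","K":"KILO","L":"LIMA","M":"MIKE","N":"NOVEMBER","O":"OSCAR","P":"PAPA","Q":"QUEBEC","R":"ROMEO","S":"SIERRA","T":"TANGO","U":"UNIFORM","V":"VICTOR","W":"WHISKEY","X":"XRAY","Y":"YANKEE","Z":"ZULU","_":"UNDERSCORE","{":"OPENCURLYBRACE","}":"CLOSECURLYBRACE","0":"ZERO","1":"ONE","2":"TWO","3":"THREE","4":"FOUR","5":"FIVE","6":"SIX","7":"SEVEN","8":"EIGHT","9":"NINE"}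
--
-- def _build_trie():
--     # index-based trie of all phonetic words: edges[i] is {char: child index},
--     # accept[i] is the decoded character at node i (or None)
--     edges = [{}]
--     accept = [None]
--     for c, w in phonetic_map.items():
--         node = 0
--         for ch in w:
--             nxt = edges[node].get(ch)
--             if nxt is None:
--                 edges.append({})
--                 accept.append(None)
--                 nxt = len(edges) - 1
--                 edges[node][ch] = nxt
--             node = nxt
--         accept[node] = c
--     return edges, accept
--
-- _EDGES, _ACCEPT = _build_trie()
--
-- def decode_phonetic_concatenated(s):
--     # Aho-style trie walk: from each position follow trie edges character by
--     # character, remembering the deepest accepting node seen; consume that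
--     # match, or emit '?' and advance one char if none.
--     out = []
--     i, n = 0, len(s)
--     while i < n:
--         node, j = 0, i
--         best = None  # (end_index, decoded char)
--         while j < n:
--             nxt = _EDGES[node].get(s[j])
--             if nxt is None:
--                 break
--             node = nxt
--             j += 1
--             if _ACCEPT[node] is not None:
--                 best = (j, _ACCEPT[node])
--         if best is None:
--             out.append("?")
--             i += 1
--         else:
--             out.append(best[1])
--             i = best[0]
--     return "".join(out)
-- ===== Notes on version B (the rewrite author's own statement) =====
-- stated objective: faster
-- what changed: A greedily scans all 39 phonetic words (sorted by length descending) with startswith at every position; B builds an index-based character trie of the words once and at each position walks trie edges character by character, consuming the deepest accepting match (correct because the word set is prefix-free) or emitting a placeholder and advancing one character.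
import Mathlib
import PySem

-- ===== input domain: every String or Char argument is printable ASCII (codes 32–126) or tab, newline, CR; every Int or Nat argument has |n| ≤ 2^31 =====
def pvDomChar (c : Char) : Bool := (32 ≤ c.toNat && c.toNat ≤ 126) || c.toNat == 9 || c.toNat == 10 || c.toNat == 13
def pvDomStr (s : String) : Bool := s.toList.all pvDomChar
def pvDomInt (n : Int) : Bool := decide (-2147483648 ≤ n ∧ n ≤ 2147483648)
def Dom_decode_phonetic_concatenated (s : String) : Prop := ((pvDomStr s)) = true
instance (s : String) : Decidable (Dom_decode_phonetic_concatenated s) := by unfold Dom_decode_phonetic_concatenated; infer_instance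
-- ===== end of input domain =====

set_option maxRecDepth 8000
set_option maxHeartbeats 2000000


-- B replaces A's per-position scan of the 39 length-sorted phonetic words (startswith each)
-- with a character trie built once; each position walks trie edges character by character,
-- remembering the deepest accepting node (objective: faster — no per-position scan of the word list).

-- ===== PORT A =====

-- module constant phonetic_map (char -> phonetic word), in dict insertion order
def pvPhoneticMap : PySem.Dict String String := PySem.Dict.ofList
  [("A","ALPHA"),("B","BRAVO"),("C","CHARLIE"),("D","DELTA"),("E","ECHO"),("F","FOXTROT"),
   ("G","GOLF"),("H","HOTEL"),("I","INDIA"),("J","JULIETT"),("K","KILO"),("L","LIMA"),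
   ("M","MIKE"),("N","NOVEMBER"),("O","OSCAR"),("P","PAPA"),("Q","QUEBEC"),("R","ROMEO"),
   ("S","SIERRA"),("T","TANGO"),("U","UNIFORM"),("V","VICTOR"),("W","WHISKEY"),("X","XRAY"),
   ("Y","YANKEE"),("Z","ZULU"),("_","UNDERSCORE"),("{","OPENCURLYBRACE"),("}","CLOSECURLYBRACE"),
   ("0","ZERO"),("1","ONE"),("2","TWO"),("3","THREE"),("4","FOUR"),("5","FIVE"),("6","SIX"),
   ("7","SEVEN"),("8","EIGHT"),("9","NINE")]

-- reverse_map = {v: k for k, v in phonetic_map.items()}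
def pvReverseMap : PySem.Dict String String :=
  pvPhoneticMap.items.foldl (fun d kv => d.insert kv.2 kv.1) PySem.Dict.empty

-- words = sorted(reverse_map.keys(), key=len, reverse=True)
def pvWordsA : List String := PySem.List.sorted pvReverseMap.keys (fun w => PySem.Str.len w) true

-- the while loop of A; the position i is carried as the remaining suffix of s (s[i:]),
-- so s.startswith(w, i) is PySem.Chars.startswith on that suffix; fuel = remaining length
-- (each iteration consumes at least one character, so fuel never runs out).
-- reverse_map[w] is ported as getD (the key w always comes from reverse_map.keys).
def pvGoA (words : List String) (rmap : PySem.Dict String String) :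
    Nat → List Char → List Char
  | 0, _ => []
  | fuel+1, rest =>
    if rest = [] then []                                    -- while i < len(s)
    else
      match words.find? (fun w => PySem.Chars.startswith rest w.toList) with
      | some w => (rmap.getD w "").toList ++ pvGoA words rmap fuel (rest.drop w.toList.length)
      | none   => '?' :: pvGoA words rmap fuel (rest.drop 1)

def decode_phonetic_concatenated (s : String) : String :=
  String.ofList (pvGoA pvWordsA pvReverseMap s.toList.length s.toList)

-- ===== PORT B =====

-- _build_trie(): index-based trie; edges[i] : char -> child index, accept[i] : decoded char
-- (a 1-char string, as in Python) or none.  The inner 'for ch in w' loop carries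
-- (edges, accept, node); Python's "append then nxt = len(edges)-1" is nxt = old length.
def pvBuildTrie : List (PySem.Dict Char Nat) × List (Option String) :=
  pvPhoneticMap.items.foldl
    (fun st cw =>
      let r := cw.2.toList.foldl
        (fun (acc : List (PySem.Dict Char Nat) × List (Option String) × Nat) ch =>
          match (acc.1.getD acc.2.2 PySem.Dict.empty).get? ch with
          | some nxt => (acc.1, acc.2.1, nxt)
          | none =>
            let nxt := acc.1.length
            (acc.1.set acc.2.2 ((acc.1.getD acc.2.2 PySem.Dict.empty).insert ch nxt)
               ++ [PySem.Dict.empty],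
             acc.2.1 ++ [none], nxt))
        (st.1, st.2, 0)
      (r.1, r.2.1.set r.2.2 (some cw.1)))
    ([PySem.Dict.empty], [none])

def pvEdges : List (PySem.Dict Char Nat) := pvBuildTrie.1
def pvAccept : List (Option String) := pvBuildTrie.2

-- the inner while loop of B: walk the trie along the suffix; j counts characters consumed
-- since position i (Python stores the absolute end index i + j in best; the caller uses
-- only the consumed count), best = deepest accepting node seen
def pvWalk (edges : List (PySem.Dict Char Nat)) (accept : List (Option String)) :
    Nat → List Char → Nat → Option (Nat × String) → Option (Nat × String)
  | _, [], _, best => best                                  -- while j < n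
  | node, c :: rest, j, best =>
    match (edges.getD node PySem.Dict.empty).get? c with
    | none => best                                          -- break
    | some nxt =>
      match accept.getD nxt none with
      | some ch => pvWalk edges accept nxt rest (j+1) (some (j+1, ch))
      | none    => pvWalk edges accept nxt rest (j+1) best

-- the outer while loop of B; out is the list of appended pieces, joined at the end
def pvGoAlt : Nat → List Char → List (List Char)
  | 0, _ => []
  | fuel+1, rest =>
    if rest = [] then []                                    -- while i < n
    else
      match pvWalk pvEdges pvAccept 0 rest 0 none with
      | none => ['?'] :: pvGoAlt fuel (rest.drop 1)
      | some (len, ch) => ch.toList :: pvGoAlt fuel (rest.drop len)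

def decode_phonetic_concatenated_alt (s : String) : String :=
  String.ofList (PySem.Chars.join [] (pvGoAlt s.toList.length s.toList))

-- ===== PRECONDITION & SPEC =====
def Spec_decode_phonetic_concatenated (s : String) (out : String) : Prop := out = decode_phonetic_concatenated_alt s
instance (s : String) (out : String) : Decidable (Spec_decode_phonetic_concatenated s out) := by unfold Spec_decode_phonetic_concatenated; infer_instance

-- ===== CLAIM (what is proved, stated in full; the proofs are below) =====
def Claim_equal_decode_phonetic_concatenated : Prop := ∀ (s : String), Dom_decode_phonetic_concatenated s → Spec_decode_phonetic_concatenated s (decode_phonetic_concatenated s)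

-- ===== LEMMAS AND PROOFS =====

-- ''.join on a list of pieces is concatenation
lemma pv_join_nil (l : List (List Char)) : PySem.Chars.join [] l = l.flatten := by
  induction l with
  | nil => rfl
  | cons x l ih =>
    cases l with
    | nil => simp [PySem.Chars.join, List.intercalate]
    | cons y t =>
      simp only [PySem.Chars.join, List.intercalate] at *
      simp [List.intersperse] at *
      simpa using ih

-- the root path of each trie node (node j spells pvNodePath[j]); verified against
-- pvEdges/pvAccept by the decide-facts below
def pvNodePath : List String := ["","A","AL","ALP","ALPH","ALPHA","B","BR","BRA","BRAV","BRAVO","C","CH","CHA","CHAR","CHARL","CHARLI","CHARLIE","D","DE","DEL","DELT","DELTA","E","EC","ECH","ECHO","F","FO","FOX","FOXT","FOXTR","FOXTRO","FOXTROT","G","GO","GOL","GOLF","H","HO","HOT","HOTE","HOTEL","I","IN","IND","INDI","INDIA","J","JU","JUL","JULI","JULIE","JULIET","JULIETT","K","KI","KIL","KILO","L","LI","LIM","LIMA","M","MI","MIK","MIKE","N","NO","NOV","NOVE","NOVEM","NOVEMB","NOVEMBE","NOVEMBER","O","OS","OSC","OSCA","OSCAR","P","PA","PAP","PAPA","Q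","QU","QUE","QUEB","QUEBE","QUEBEC","R","RO","ROM","ROME","ROMEO","S","SI","SIE","SIER","SIERR","SIERRA","T","TA","TAN","TANG","TANGO","U","UN","UNI","UNIF","UNIFO","UNIFOR","UNIFORM","V","VI","VIC","VICT","VICTO","VICTOR","W","WH","WHI","WHIS","WHISK","WHISKE","WHISKEY","X","XR","XRA","XRAY","Y","YA","YAN","YANK","YANKE","YANKEE","Z","ZU","ZUL","ZULU","UND","UNDE","UNDER","UNDERS","UNDERSC","UNDERSCO","UNDERSCOR","UNDERSCORE","OP","OPE","OPEN","OPENC","OPENCU","OPENCUR","OPENCURL","OPENCURLY","OPENCURLYB","OPENCURLYBR","OPENCURLYBRA","OPENCURLYBRAC","OPENCURLYBRACE","CL","CLO","CLOS","CLOSE","CLOSEC","CLOSECU","CLOSECUR","CLOSECURL","CLOSECURLY","CLOSECURLYB","CLOSECURLYBR","CLOSECURLYBRA","CLOSECURLYBRAC","CLOSECURLYBRACE","ZE","ZER","ZERO","ON","ONE","TW","TWO","TH","THR","THRE","THREE","FOU","FOUR","FI","FIV","FIVE","SIX","SE","SEV","SEVE","SEVEN","EI","EIG","EIGH","EIGH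T","NI","NIN","NINE"]

-- the (word, decoded char) pairs A uses, in A's scan order
def pvPairs : List (String × String) := pvWordsA.map (fun w => (w, pvReverseMap.getD w ""))

-- "clean follow": from node idx the characters u walk existing edges through
-- non-accepting nodes to an accepting LEAF labelled ch
def pvFCb : List Char → String → Nat → Bool
  | [], _, _ => false
  | c :: u, ch, idx =>
    match (pvEdges.getD idx PySem.Dict.empty).get? c with
    | none => false
    | some nxt =>
      match u with
      | [] => decide (pvAccept.getD nxt none = some ch)
                && decide (pvEdges.getD nxt PySem.Dict.empty = PySem.Dict.empty)
      | _ :: _ => decide (pvAccept.getD nxt none = none) && pvFCb u ch nxt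

-- every word of A, followed from the root, is a clean path to its decoded char
lemma pv_fc_words : ∀ w ∈ pvWordsA, pvFCb w.toList (pvReverseMap.getD w "") 0 = true := by decide

-- trie edges are consistent with pvNodePath and stay in range
lemma pv_edge_path : ∀ i ∈ List.range 203, ∀ p ∈ (pvEdges.getD i PySem.Dict.empty).items,
    p.2 < 203 ∧ (pvNodePath.getD p.2 "").toList = (pvNodePath.getD i "").toList ++ [p.1] := by
  decide

-- every accepting node's root path is one of A's words (with its decoded char)
lemma pv_accept_word : ∀ j ∈ List.range 203, ∀ ch ∈ (pvAccept.getD j none).toList,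
    (pvNodePath.getD j "", ch) ∈ pvPairs := by decide

lemma pv_root_path : pvNodePath.getD 0 "" = "" := by decide

-- a walk from a node with no outgoing edges returns best unchanged
lemma pv_walk_leaf (idx : Nat) (h : pvEdges.getD idx PySem.Dict.empty = PySem.Dict.empty)
    (t : List Char) (j : Nat) (best : Option (Nat × String)) :
    pvWalk pvEdges pvAccept idx t j best = best := by
  cases t with
  | nil => rfl
  | cons c t' => rw [pvWalk, h]; simp

-- a clean path forces the walk's result, whatever follows it
lemma pv_walk_along : ∀ (u : List Char) (ch : String) (idx : Nat),
    pvFCb u ch idx = true → ∀ (t : List Char) (j : Nat) (best : Option (Nat × String)),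
    pvWalk pvEdges pvAccept idx (u ++ t) j best = some (j + u.length, ch) := by
  intro u
  induction u with
  | nil => intro ch idx h; simp [pvFCb] at h
  | cons c u ih =>
    intro ch idx h t j best
    rw [pvFCb] at h
    cases hg : (pvEdges.getD idx PySem.Dict.empty).get? c with
    | none => rw [hg] at h; simp at h
    | some nxt =>
      rw [hg] at h
      cases u with
      | nil =>
        simp only [Bool.and_eq_true, decide_eq_true_eq] at h
        rw [List.cons_append, List.nil_append, pvWalk]
        simp only [hg, h.1]
        rw [pv_walk_leaf nxt h.2]
        simp
      | cons c' u' =>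
        simp only [Bool.and_eq_true, decide_eq_true_eq] at h
        rw [List.cons_append, pvWalk]
        simp only [hg, h.1]
        rw [ih ch nxt h.2]
        simp only [Option.some.injEq, Prod.mk.injEq, List.length_cons]
        exact ⟨by omega, trivial⟩

-- if no word's remainder below idx is a prefix of t, the walk finds nothing
lemma pv_walk_none : ∀ (t : List Char) (idx : Nat) (j : Nat), idx < 203 →
    (∀ w c, (w, c) ∈ pvPairs → ∀ u, w.toList = (pvNodePath.getD idx "").toList ++ u → ¬ u <+: t) →
    pvWalk pvEdges pvAccept idx t j none = none := by
  intro t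
  induction t with
  | nil => intro idx j _ _; rfl
  | cons c t' ih =>
    intro idx j hidx H
    rw [pvWalk]
    cases hg : (pvEdges.getD idx PySem.Dict.empty).get? c with
    | none => rfl
    | some nxt =>
      simp only [hg]
      have hmem := PySem.Dict.mem_items_of_get?_eq_some _ hg
      have hedge := pv_edge_path idx (by simpa using hidx) (c, nxt) hmem
      cases ha : pvAccept.getD nxt none with
      | some ch =>
        have hacc := pv_accept_word nxt (by simpa using hedge.1) ch (by rw [ha]; simp)
        exact absurd (⟨t', rfl⟩ : [c] <+: c :: t')
          (H _ _ hacc [c] (by rw [hedge.2]))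
      | none =>
        simp only [ha]
        exact ih nxt (j+1) hedge.1 (fun w cc hw u hu => by
          have := H w cc hw (c :: u) (by rw [hu, hedge.2]; simp)
          intro hpre
          exact this (List.cons_prefix_cons.mpr ⟨rfl, hpre⟩))

-- one step of B (trie walk from the root) equals one step of A (first startswith
-- match over the length-descending word list), together with its decoded char
lemma pv_step_eq (rest : List Char) :
    pvWalk pvEdges pvAccept 0 rest 0 none
      = (pvWordsA.find? (fun w => PySem.Chars.startswith rest w.toList)).map
          (fun w => (w.toList.length, pvReverseMap.getD w "")) := by
  cases hfind : pvWordsA.find? (fun w => PySem.Chars.startswith rest w.toList) with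
  | some w =>
    have hw : w ∈ pvWordsA := List.mem_of_find?_eq_some hfind
    have hpre : w.toList <+: rest := by
      have := List.find?_some hfind
      exact (PySem.Chars.startswith_iff _ _).mp this
    obtain ⟨t, rfl⟩ := hpre
    rw [pv_walk_along w.toList (pvReverseMap.getD w "") 0 (pv_fc_words w hw) t 0 none]
    simp
  | none =>
    rw [Option.map_none]
    apply pv_walk_none rest 0 0 (by norm_num)
    intro w c hwc u hu hpre
    have hwA : w ∈ pvWordsA := by
      obtain ⟨w', hw', heq⟩ := List.mem_map.mp hwc
      injection heq with h1 h2
      exact h1 ▸ hw'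
    have hnot := List.find?_eq_none.mp hfind w hwA
    rw [pv_root_path] at hu
    simp at hu
    apply hnot
    rw [PySem.Chars.startswith_iff, hu]
    exact hpre

-- the two loops produce the same decoded text
lemma pv_go_eq (fuel : Nat) : ∀ rest : List Char,
    pvGoA pvWordsA pvReverseMap fuel rest
      = PySem.Chars.join [] (pvGoAlt fuel rest) := by
  induction fuel with
  | zero => intro rest; simp [pvGoA, pvGoAlt]
  | succ fuel ih =>
    intro rest
    rw [pvGoA, pvGoAlt]
    by_cases hrest : rest = []
    · simp [hrest]
    · simp only [hrest, if_false]
      rw [pv_step_eq]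
      cases hfind : pvWordsA.find? (fun w => PySem.Chars.startswith rest w.toList) with
      | none => simp [pv_join_nil, ih]
      | some w => simp [pv_join_nil, ih]

-- ===== VERDICT (by name: the statement is the Claim_ definition above) =====
theorem decode_phonetic_concatenated_spec : Claim_equal_decode_phonetic_concatenated := by
  intro s _
  show _ = _
  unfold decode_phonetic_concatenated decode_phonetic_concatenated_alt
  rw [pv_go_eq]
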